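-- pv_equiv track=rewrite | github.com/Quantompixel/AdventOfCode2022 | day_4/main.py | do_ranges_overlap
-- ===== SOURCE A (Python) =====
-- def do_ranges_overlap(range_1, range_2):
--     if len(range_1) < len(range_2):
--         for task in range_1:
--             if range_2.__contains__(task):
--                 return True
--         return False
--     else:
--         for task in range_2:
--             if range_1.__contains__(task):
--                 return True
--         return False
-- ===== SOURCE B (Python) =====
-- def do_ranges_overlap(range_1, range_2):
--     # sort both sides, then a two-pointer merge scan looks for a common element
--     a = sorted(range_1)
--     b = sorted(range_2)
--     i = j = 0
--     while i < len(a) and j < len(b):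
--         if a[i] == b[j]:
--             return True
--         if a[i] < b[j]:
--             i += 1
--         else:
--             j += 1
--     return False
-- ===== Notes on version B (the rewrite author's own statement) =====
-- stated objective: alternative
-- what changed: Replaces A's length-dispatched element-by-element scan with per-element list membership by sorting both lists and running a two-pointer merge scan that finds a common element.
import Mathlib
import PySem

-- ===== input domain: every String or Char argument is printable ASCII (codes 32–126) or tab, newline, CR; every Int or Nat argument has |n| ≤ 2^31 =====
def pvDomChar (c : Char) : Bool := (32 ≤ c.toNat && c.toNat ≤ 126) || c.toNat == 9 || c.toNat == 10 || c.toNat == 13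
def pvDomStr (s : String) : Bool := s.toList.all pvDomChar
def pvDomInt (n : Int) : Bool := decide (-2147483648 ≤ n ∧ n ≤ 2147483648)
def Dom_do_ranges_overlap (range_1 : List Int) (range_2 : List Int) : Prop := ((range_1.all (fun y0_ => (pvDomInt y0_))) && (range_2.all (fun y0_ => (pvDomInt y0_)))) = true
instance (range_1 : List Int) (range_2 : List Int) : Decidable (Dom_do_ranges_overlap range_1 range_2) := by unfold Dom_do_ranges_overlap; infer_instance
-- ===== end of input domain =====

-- B replaces A's length-dispatched membership scan by sort-both + two-pointer merge (alternative algorithm).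

-- ===== PORT A =====
-- the 'for task in xs: if ys.__contains__(task): return True / return False' loop
def pvScan (xs ys : List Int) : Bool :=
  match xs with
  | [] => false
  | task :: rest => if ys.contains task then true else pvScan rest ys

def do_ranges_overlap (range_1 : List Int) (range_2 : List Int) : Bool :=
  if range_1.length < range_2.length then pvScan range_1 range_2
  else pvScan range_2 range_1

-- ===== PORT B =====
-- the two-pointer while loop: advancing an index = dropping the head of that sorted list
def pvMerge : List Int → List Int → Bool
  | [], _ => false
  | _ :: _, [] => false
  | x :: xs, y :: ys =>
    if x = y then true
    else if x < y then pvMerge xs (y :: ys)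
    else pvMerge (x :: xs) ys

def do_ranges_overlap_alt (range_1 : List Int) (range_2 : List Int) : Bool :=
  pvMerge (PySem.List.sorted range_1 (fun x => x) false)
          (PySem.List.sorted range_2 (fun x => x) false)

-- ===== PRECONDITION & SPEC =====
def Spec_do_ranges_overlap (range_1 : List Int) (range_2 : List Int) (out : Bool) : Prop := out = do_ranges_overlap_alt range_1 range_2
instance (range_1 : List Int) (range_2 : List Int) (out : Bool) : Decidable (Spec_do_ranges_overlap range_1 range_2 out) := by unfold Spec_do_ranges_overlap; infer_instance

-- ===== CLAIM (what is proved, stated in full; the proofs are below) =====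
def Claim_equal_do_ranges_overlap : Prop := ∀ (range_1 : List Int) (range_2 : List Int), Dom_do_ranges_overlap range_1 range_2 → Spec_do_ranges_overlap range_1 range_2 (do_ranges_overlap range_1 range_2)

-- ===== LEMMAS AND PROOFS =====

lemma pvScan_eq_any (xs ys : List Int) : pvScan xs ys = xs.any (fun t => ys.contains t) := by
  induction xs with
  | nil => rfl
  | cons t rest ih =>
    simp only [pvScan, List.any_cons, ih]
    split <;> simp_all

lemma pvMerge_iff : ∀ (xs ys : List Int), xs.Pairwise (· ≤ ·) → ys.Pairwise (· ≤ ·) →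
    (pvMerge xs ys = true ↔ ∃ t, t ∈ xs ∧ t ∈ ys)
  | [], ys, _, _ => by simp [pvMerge]
  | x :: xs, [], _, _ => by simp [pvMerge]
  | x :: xs, y :: ys, hx, hy => by
    rw [List.pairwise_cons] at hx hy
    by_cases hxy : x = y
    · subst hxy
      have h : pvMerge (x :: xs) (x :: ys) = true := by simp [pvMerge]
      rw [h]
      constructor
      · intro _; exact ⟨x, List.mem_cons_self, List.mem_cons_self⟩
      · intro _; rfl
    · by_cases hlt : x < y
      · rw [show pvMerge (x :: xs) (y :: ys) = pvMerge xs (y :: ys) from by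
            simp [pvMerge, hxy, hlt]]
        rw [pvMerge_iff xs (y :: ys) hx.2 (List.pairwise_cons.mpr hy)]
        constructor
        · rintro ⟨t, h1, h2⟩; exact ⟨t, List.mem_cons_of_mem _ h1, h2⟩
        · rintro ⟨t, h1, h2⟩
          rcases List.mem_cons.mp h1 with rfl | h1
          · exfalso
            rcases List.mem_cons.mp h2 with rfl | h2
            · exact hxy rfl
            · exact absurd (hy.1 t h2) (by omega)
          · exact ⟨t, h1, h2⟩
      · rw [show pvMerge (x :: xs) (y :: ys) = pvMerge (x :: xs) ys from by
            simp [pvMerge, hxy, hlt]]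
        rw [pvMerge_iff (x :: xs) ys (List.pairwise_cons.mpr hx) hy.2]
        constructor
        · rintro ⟨t, h1, h2⟩; exact ⟨t, h1, List.mem_cons_of_mem _ h2⟩
        · rintro ⟨t, h1, h2⟩
          rcases List.mem_cons.mp h2 with rfl | h2
          · exfalso
            rcases List.mem_cons.mp h1 with rfl | h1
            · exact hxy rfl
            · have := hx.1 t h1; omega
          · exact ⟨t, h1, h2⟩
termination_by xs ys => xs.length + ys.length
decreasing_by all_goals simp

lemma alt_iff (r1 r2 : List Int) :
    do_ranges_overlap_alt r1 r2 = true ↔ ∃ t, t ∈ r1 ∧ t ∈ r2 := by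
  unfold do_ranges_overlap_alt
  rw [pvMerge_iff _ _ (PySem.List.sorted_pairwise r1 (fun x => x))
        (PySem.List.sorted_pairwise r2 (fun x => x))]
  constructor
  · rintro ⟨t, h1, h2⟩
    exact ⟨t, (PySem.List.mem_sorted _ _ _ _).mp h1, (PySem.List.mem_sorted _ _ _ _).mp h2⟩
  · rintro ⟨t, h1, h2⟩
    exact ⟨t, (PySem.List.mem_sorted _ _ _ _).mpr h1, (PySem.List.mem_sorted _ _ _ _).mpr h2⟩

lemma scan_iff (xs ys : List Int) :
    pvScan xs ys = true ↔ ∃ t, t ∈ xs ∧ t ∈ ys := by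
  rw [pvScan_eq_any]
  simp [List.any_eq_true]

-- ===== VERDICT (by name: the statement is the Claim_ definition above) =====
theorem do_ranges_overlap_spec : Claim_equal_do_ranges_overlap := by
  intro r1 r2 _
  unfold Spec_do_ranges_overlap do_ranges_overlap
  rw [Bool.eq_iff_iff]
  split
  · rw [scan_iff, alt_iff]
  · rw [scan_iff, alt_iff]
    constructor
    · rintro ⟨t, h1, h2⟩; exact ⟨t, h2, h1⟩
    · rintro ⟨t, h1, h2⟩; exact ⟨t, h2, h1⟩
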